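-- pv_equiv track=rewrite | github.com/byn1002/Doge-ADMM | tfgraph.py | divide_rows_into_partitions
-- ===== SOURCE A (Python) =====
-- def can_add_to_partition(partition_set, row_set):
--     """检查是否可以将行添加到当前分区，而不引入重复元素"""
--     return partition_set.isdisjoint(row_set)
--
-- def backtrack(rows, partitions, partition_sets, index, row_indices):
--     """回溯算法，尝试将 rows 分为 max_part 个不重复的分区"""
--     if index == len(rows):
--         return True  # 所有行都成功分配
--     current_row = rows[index]
--     current_row_set = set(current_row)
--
--     for i in range(len(partitions)):
--         if can_add_to_partition(partition_sets[i], current_row_set):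
--             partitions[i].extend(current_row)
--             partition_sets[i].update(current_row_set)
--             row_indices[i].append(index)  # 记录分区中的行索引
--
--             if backtrack(rows, partitions, partition_sets, index + 1, row_indices):
--                 return True
--
--             # 回溯
--             partitions[i] = partitions[i][:-len(current_row)]
--             partition_sets[i].difference_update(current_row_set)
--             row_indices[i].pop()
--
--     return False  # 无法找到有效分配
--
-- def divide_rows_into_partitions(rows, max_part):
--     partitions = [[] for _ in range(max_part)]
--     partition_sets = [set() for _ in range(max_part)]  # 使用集合存储分区中的元素
--     row_indices = [[] for _ in range(max_part)]  # 初始化行索引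
--     if backtrack(rows, partitions, partition_sets, 0, row_indices):
--         return partitions, row_indices
--     else:
--         return None, None  # 无法找到有效分配
-- ===== SOURCE B (Python) =====
-- def divide_rows_into_partitions(rows, max_part):
--     partitions = [[] for _ in range(max_part)]
--     partition_sets = [set() for _ in range(max_part)]
--     row_indices = [[] for _ in range(max_part)]
--     stack = []   # partition chosen for each placed row, in placement order
--     index = 0    # next row to place
--     start = 0    # first partition to try for rows[index]
--     while True:
--         if index == len(rows):
--             return partitions, row_indices
--         row = rows[index]
--         row_set = set(row)
--         placed = None
--         for i in range(start, len(partitions)):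
--             if partition_sets[i].isdisjoint(row_set):
--                 placed = i
--                 break
--         if placed is not None:
--             partitions[placed].extend(row)
--             partition_sets[placed].update(row_set)
--             row_indices[placed].append(index)
--             stack.append(placed)
--             index += 1
--             start = 0
--         else:
--             if not stack:
--                 return None, None
--             index -= 1
--             i = stack.pop()
--             prev = rows[index]
--             partitions[i] = partitions[i][:-len(prev)]
--             partition_sets[i].difference_update(set(prev))
--             row_indices[i].pop()
--             start = i + 1
-- ===== Notes on version B (the rewrite author's own statement) =====
-- stated objective: alternative
-- what changed: The recursive backtrack with implicit call-stack undo is replaced by an explicit iterative while-loop driven by a stack of chosen partition indices and a resume pointer: it places the first disjoint partition scanning from `start`, and on a dead end pops the last placement, undoes it with the same operations (slice off the row, set difference, pop the index), and resumes past the popped partition; same DFS order, so the first full assignment returned is identical.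
import Mathlib
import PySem

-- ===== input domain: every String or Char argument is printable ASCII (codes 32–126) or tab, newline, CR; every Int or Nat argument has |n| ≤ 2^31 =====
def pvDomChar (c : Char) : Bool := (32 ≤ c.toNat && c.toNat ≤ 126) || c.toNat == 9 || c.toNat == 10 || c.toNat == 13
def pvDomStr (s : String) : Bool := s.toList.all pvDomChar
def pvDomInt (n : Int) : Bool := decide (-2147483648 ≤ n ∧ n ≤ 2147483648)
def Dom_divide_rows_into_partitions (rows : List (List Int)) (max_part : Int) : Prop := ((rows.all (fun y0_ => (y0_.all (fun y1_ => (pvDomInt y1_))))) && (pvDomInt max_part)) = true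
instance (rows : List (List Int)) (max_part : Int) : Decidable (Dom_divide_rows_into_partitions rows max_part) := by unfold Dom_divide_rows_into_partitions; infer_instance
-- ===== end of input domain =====

-- B replaces A's recursive backtracking by an explicit iterative stack-driven
-- backtracking loop (same DFS order, same undo operations); objective: alternative
-- decomposition, same asymptotic cost.  A mutates its list arguments only via
-- helper-local state; both ports are about the RETURN value.

-- ===== PORT A =====
-- State = (partitions, partition_sets, row_indices); Python sets are PySem.Set Int.
-- `m` is len(partitions): the list is created with max_part.toNat entries and its
-- length never changes (elements are only replaced with List.set), so
-- range(len(partitions)) is range m.  `rows.getD index []` is exact: index < rows.length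
-- at every use (guarded).  `(…).dropLast` models row_indices[i].pop(): the popped list
-- is provably nonempty there (the element appended before the recursive call is still
-- present when the call fails), so dropLast is exact on every reachable state.
mutual
  -- backtrack(rows, partitions, partition_sets, row_indices, index)
  def btA (rows : List (List Int)) (m : Nat) (index : Nat)
      (parts sets rI : List (List Int)) :
      Bool × List (List Int) × List (List Int) × List (List Int) :=
    if h : rows.length ≤ index then (true, parts, sets, rI)
    else
      loopA rows m index (rows.getD index [])
        (PySem.Set.ofList (rows.getD index [])) 0 (by omega) parts sets rI
  termination_by (rows.length + 1 - index, m + 2)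

  -- the `for i in range(len(partitions))` loop inside backtrack
  def loopA (rows : List (List Int)) (m : Nat) (index : Nat)
      (row rs : List Int) (i : Nat) (h : index < rows.length)
      (parts sets rI : List (List Int)) :
      Bool × List (List Int) × List (List Int) × List (List Int) :=
    if hi : m ≤ i then (false, parts, sets, rI)
    else
      -- can_add_to_partition(partition_sets[i], current_row_set)
      if PySem.Set.isdisjoint (sets.getD i []) rs then
        match btA rows m (index + 1)
            (parts.set i (parts.getD i [] ++ row))
            (sets.set i (PySem.Set.update (sets.getD i []) rs))
            (rI.set i (rI.getD i [] ++ [(index : Int)])) with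
        | (true, p, s, r) => (true, p, s, r)
        | (false, p, s, r) =>
            loopA rows m index row rs (i + 1) h
              (p.set i (PySem.List.slice (p.getD i []) none (some (-(row.length : Int)))))
              (s.set i (PySem.Set.diff (s.getD i []) rs))
              (r.set i ((r.getD i []).dropLast))
      else loopA rows m index row rs (i + 1) h parts sets rI
  termination_by (rows.length + 1 - index, m + 1 - i)
end

def divide_rows_into_partitions (rows : List (List Int)) (max_part : Int) : Option (List (List Int)) × Option (List (List Int)) :=
  let m := max_part.toNat   -- number of partitions created by [[] for _ in range(max_part)]
  match btA rows m 0 (List.replicate m []) (List.replicate m []) (List.replicate m []) with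
  | (true, parts, _, rI) => (some parts, some rI)
  | (false, _, _, _) => (none, none)

-- ===== PORT B =====
-- the inner scan `for i in range(start, len(partitions)): if … break` (finds `placed`)
def findPlaceB (sets : List (List Int)) (rs : List Int) (i m : Nat) : Option Nat :=
  if _h : m ≤ i then none
  else if PySem.Set.isdisjoint (sets.getD i []) rs then some i
  else findPlaceB sets rs (i + 1) m
termination_by m - i

-- fuel bound for the while-loop (totality guard only: proven sufficient below,
-- the `none` branch of loopB is never taken from this initial fuel)
def fuelB (m : Nat) : Nat → Nat
  | 0 => 1
  | r + 1 => m * (fuelB m r + 1) + 1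

-- the `while True:` loop of B; one fuel unit per iteration
def loopB (rows : List (List Int)) (m : Nat) (fuel : Nat)
    (parts sets rI : List (List Int)) (stack : List Nat) (index start : Nat) :
    Option (Option (List (List Int)) × Option (List (List Int))) :=
  match fuel with
  | 0 => none
  | fuel + 1 =>
    if rows.length ≤ index then some (some parts, some rI)
    else
      let row := rows.getD index []
      let rs := PySem.Set.ofList row
      match findPlaceB sets rs start m with
      | some i =>
          loopB rows m fuel
            (parts.set i (parts.getD i [] ++ row))
            (sets.set i (PySem.Set.update (sets.getD i []) rs))
            (rI.set i (rI.getD i [] ++ [(index : Int)]))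
            (i :: stack) (index + 1) 0
      | none =>
          match stack with
          | [] => some (none, none)
          | i :: rest =>
              let prev := rows.getD (index - 1) []
              loopB rows m fuel
                (parts.set i (PySem.List.slice (parts.getD i []) none (some (-(prev.length : Int)))))
                (sets.set i (PySem.Set.diff (sets.getD i []) (PySem.Set.ofList prev)))
                (rI.set i ((rI.getD i []).dropLast))
                rest (index - 1) (i + 1)

def divide_rows_into_partitions_alt (rows : List (List Int)) (max_part : Int) : Option (List (List Int)) × Option (List (List Int)) :=
  let m := max_part.toNat
  match loopB rows m (fuelB m rows.length) (List.replicate m []) (List.replicate m [])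
      (List.replicate m []) [] 0 0 with
  | some res => res
  | none => (none, none)   -- unreachable: fuelB m rows.length iterations always suffice (proved below)

-- ===== PRECONDITION & SPEC =====
def Spec_divide_rows_into_partitions (rows : List (List Int)) (max_part : Int) (out : Option (List (List Int)) × Option (List (List Int))) : Prop := out = divide_rows_into_partitions_alt rows max_part
instance (rows : List (List Int)) (max_part : Int) (out : Option (List (List Int)) × Option (List (List Int))) : Decidable (Spec_divide_rows_into_partitions rows max_part out) := by unfold Spec_divide_rows_into_partitions; infer_instance

-- ===== CLAIM (what is proved, stated in full; the proofs are below) =====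
def Claim_equal_divide_rows_into_partitions : Prop := ∀ (rows : List (List Int)) (max_part : Int), Dom_divide_rows_into_partitions rows max_part → Spec_divide_rows_into_partitions rows max_part (divide_rows_into_partitions rows max_part)

-- ===== LEMMAS AND PROOFS =====

-- fuel bound indexed by the resume position `start` of the scan
def cB2 (m r start : Nat) : Nat :=
  match r with
  | 0 => 1
  | r + 1 => (m - start) * (fuelB m r + 1) + 1

theorem cB2_zero (m r : Nat) : cB2 m r 0 = fuelB m r := by
  cases r <;> simp [cB2, fuelB]

-- one step of backtrack: the body of btA at an arbitrary scan position
def AStep (rows : List (List Int)) (m index start : Nat)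
    (parts sets rI : List (List Int)) :
    Bool × List (List Int) × List (List Int) × List (List Int) :=
  if h : rows.length ≤ index then (true, parts, sets, rI)
  else loopA rows m index (rows.getD index [])
        (PySem.Set.ofList (rows.getD index [])) start (by omega) parts sets rI

-- what loopB does after a failed scan at level `index`
def popK (rows : List (List Int)) (m fuel : Nat)
    (parts sets rI : List (List Int)) (stack : List Nat) (index : Nat) :
    Option (Option (List (List Int)) × Option (List (List Int))) :=
  match stack with
  | [] => some (none, none)
  | i :: rest =>
      let prev := rows.getD (index - 1) []
      loopB rows m fuel
        (parts.set i (PySem.List.slice (parts.getD i []) none (some (-(prev.length : Int)))))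
        (sets.set i (PySem.Set.diff (sets.getD i []) (PySem.Set.ofList prev)))
        (rI.set i ((rI.getD i []).dropLast))
        rest (index - 1) (i + 1)

theorem loopB_succ (rows : List (List Int)) (m fuel : Nat)
    (parts sets rI : List (List Int)) (stack : List Nat) (index start : Nat) :
    loopB rows m (fuel + 1) parts sets rI stack index start =
      if rows.length ≤ index then some (some parts, some rI)
      else
        match findPlaceB sets (PySem.Set.ofList (rows.getD index [])) start m with
        | some i =>
            loopB rows m fuel
              (parts.set i (parts.getD i [] ++ rows.getD index []))
              (sets.set i (PySem.Set.update (sets.getD i []) (PySem.Set.ofList (rows.getD index []))))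
              (rI.set i (rI.getD i [] ++ [(index : Int)]))
              (i :: stack) (index + 1) 0
        | none => popK rows m fuel parts sets rI stack index := by
  rw [loopB.eq_def]
  rfl

theorem loopB_mono (rows : List (List Int)) (m : Nat) :
    ∀ (f g : Nat) (parts sets rI : List (List Int)) (stack : List Nat) (index start : Nat) v,
      f ≤ g → loopB rows m f parts sets rI stack index start = some v →
      loopB rows m g parts sets rI stack index start = some v := by
  intro f
  induction f with
  | zero => intro g parts sets rI stack index start v _ h; simp [loopB] at h
  | succ f ih =>
    intro g parts sets rI stack index start v hfg h
    obtain ⟨g, rfl⟩ : ∃ g', g = g' + 1 := ⟨g - 1, by omega⟩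
    rw [loopB_succ] at h ⊢
    by_cases hn : rows.length ≤ index
    · simpa [hn] using (by simpa [hn] using h : some (some parts, some rI) = some v)
    · simp only [if_neg hn] at h ⊢
      cases hf : findPlaceB sets (PySem.Set.ofList (rows.getD index [])) start m with
      | some i =>
        rw [hf] at h
        exact ih g _ _ _ _ _ _ _ (by omega) h
      | none =>
        rw [hf] at h
        unfold popK at h ⊢
        cases stack with
        | nil => exact h
        | cons i rest => exact ih g _ _ _ _ _ _ _ (by omega) h

theorem popK_mono (rows : List (List Int)) (m : Nat) (f g : Nat)
    (parts sets rI : List (List Int)) (stack : List Nat) (index : Nat) (v : _)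
    (hfg : f ≤ g) (h : popK rows m f parts sets rI stack index = some v) :
    popK rows m g parts sets rI stack index = some v := by
  unfold popK at h ⊢
  cases stack with
  | nil => exact h
  | cons i rest => exact loopB_mono rows m f g _ _ _ _ _ _ _ hfg h

theorem findPlaceB_none (sets : List (List Int)) (rs : List Int) (i m : Nat)
    (h : m ≤ i) : findPlaceB sets rs i m = none := by
  rw [findPlaceB, dif_pos h]

theorem findPlaceB_hit (sets : List (List Int)) (rs : List Int) (i m : Nat)
    (h : i < m) (hd : PySem.Set.isdisjoint (sets.getD i []) rs = true) :
    findPlaceB sets rs i m = some i := by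
  rw [findPlaceB, dif_neg (Nat.not_le.mpr h), if_pos hd]

theorem findPlaceB_skip (sets : List (List Int)) (rs : List Int) (i m : Nat)
    (h : i < m) (hd : PySem.Set.isdisjoint (sets.getD i []) rs = false) :
    findPlaceB sets rs i m = findPlaceB sets rs (i + 1) m := by
  rw [findPlaceB, dif_neg (Nat.not_le.mpr h), if_neg (by rw [hd]; exact Bool.false_ne_true)]

-- arithmetic facts about the fuel bound
theorem cB2_pos (m r start : Nat) : 1 ≤ cB2 m r start := by
  cases r <;> simp [cB2]

theorem cB2_mono (m r start : Nat) : cB2 m r (start + 1) ≤ cB2 m r start := by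
  cases r with
  | zero => simp [cB2]
  | succ r =>
    simp only [cB2]
    have := Nat.mul_le_mul_right (fuelB m r + 1) (show m - (start + 1) ≤ m - start by omega)
    omega

theorem fuel_push (m r start : Nat) (hm : start < m) (hr : 1 ≤ r) :
    cB2 m (r - 1) 0 + 1 ≤ cB2 m r start := by
  obtain ⟨rr, rfl⟩ : ∃ rr, r = rr + 1 := ⟨r - 1, by omega⟩
  rw [cB2_zero]
  simp only [cB2, Nat.add_sub_cancel]
  have h1 : (fuelB m rr + 1) ≤ (m - start) * (fuelB m rr + 1) :=
    Nat.le_mul_of_pos_left _ (by omega)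
  omega

theorem fuel_split (m r start f : Nat) (hm : start < m) (hr : 1 ≤ r) :
    cB2 m (r - 1) 0 + (cB2 m r (start + 1) + f) + 1 ≤ cB2 m r start + f := by
  obtain ⟨rr, rfl⟩ : ∃ rr, r = rr + 1 := ⟨r - 1, by omega⟩
  rw [cB2_zero]
  simp only [cB2, Nat.add_sub_cancel]
  obtain ⟨t, ht⟩ : ∃ t, m - start = t + 1 := ⟨m - start - 1, by omega⟩
  have ht1 : m - (start + 1) = t := by omega
  rw [ht, ht1, Nat.succ_mul]
  omega

theorem loopB_skip (rows : List (List Int)) (m g : Nat)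
    (parts sets rI : List (List Int)) (stack : List Nat) (index start : Nat)
    (hn : ¬ rows.length ≤ index) (hm : start < m)
    (hd : PySem.Set.isdisjoint (sets.getD start []) (PySem.Set.ofList (rows.getD index [])) = false) :
    loopB rows m g parts sets rI stack index start =
      loopB rows m g parts sets rI stack index (start + 1) := by
  cases g with
  | zero => rfl
  | succ g =>
    rw [loopB_succ, loopB_succ, if_neg hn, if_neg hn, findPlaceB_skip _ _ _ _ hm hd]

theorem AStep_zero (rows : List (List Int)) (m index : Nat)
    (parts sets rI : List (List Int)) :
    AStep rows m index 0 parts sets rI = btA rows m index parts sets rI := by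
  rw [AStep, btA]

-- the simulation lemma: with enough fuel, B's loop from scan position `start`
-- computes what A's backtrack computes, popK playing the pending continuations
theorem ML_base (rows : List (List Int)) (m : Nat) (index start : Nat)
    (parts sets rI : List (List Int)) (stack : List Nat) (f : Nat)
    (v : Option (List (List Int)) × Option (List (List Int))) (g : Nat)
    (hbase : rows.length ≤ index ∨ m ≤ start)
    (H : (match AStep rows m index start parts sets rI with
          | (true, p, _, rr) => some (some p, some rr)
          | (false, p, ss, rr) => popK rows m f p ss rr stack index) = some v)
    (hg : cB2 m (rows.length - index) start + f ≤ g) :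
    loopB rows m g parts sets rI stack index start = some v := by
  obtain ⟨g, rfl⟩ : ∃ g', g = g' + 1 := ⟨g - 1, by have := cB2_pos m (rows.length - index) start; omega⟩
  rw [loopB_succ]
  by_cases hn : rows.length ≤ index
  · rw [AStep, dif_pos hn] at H
    rw [if_pos hn]
    exact H
  · have hm : m ≤ start := by tauto
    rw [AStep, dif_neg hn, loopA, dif_pos hm] at H
    rw [if_neg hn, findPlaceB_none _ _ _ _ hm]
    have hr1 : 1 ≤ rows.length - index := by omega
    have hcb : cB2 m (rows.length - index) start = 1 := by
      obtain ⟨rr, hrr⟩ : ∃ rr, rows.length - index = rr + 1 := ⟨rows.length - index - 1, by omega⟩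
      rw [hrr]; simp only [cB2]; have : m - start = 0 := by omega
      rw [this]; ring
    exact popK_mono rows m f g _ _ _ _ _ _ (by omega) H

theorem ML (rows : List (List Int)) (m : Nat) :
    ∀ (r s index start : Nat) (parts sets rI : List (List Int)) (stack : List Nat)
      (f : Nat) (v : Option (List (List Int)) × Option (List (List Int))) (g : Nat),
      rows.length - index ≤ r → m - start ≤ s →
      (match AStep rows m index start parts sets rI with
       | (true, p, _, rr) => some (some p, some rr)
       | (false, p, ss, rr) => popK rows m f p ss rr stack index) = some v →
      cB2 m (rows.length - index) start + f ≤ g →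
      loopB rows m g parts sets rI stack index start = some v := by
  intro r
  induction r with
  | zero =>
    intro s index start parts sets rI stack f v g hr _ H hg
    exact ML_base rows m index start parts sets rI stack f v g (Or.inl (by omega)) H hg
  | succ r ihr =>
    intro s
    induction s with
    | zero =>
      intro index start parts sets rI stack f v g _ hs H hg
      by_cases hn : rows.length ≤ index
      · exact ML_base rows m index start parts sets rI stack f v g (Or.inl hn) H hg
      · exact ML_base rows m index start parts sets rI stack f v g (Or.inr (by omega)) H hg
    | succ s ihs =>
      intro index start parts sets rI stack f v g hr hs H hg
      by_cases hn : rows.length ≤ index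
      · exact ML_base rows m index start parts sets rI stack f v g (Or.inl hn) H hg
      by_cases hm : m ≤ start
      · exact ML_base rows m index start parts sets rI stack f v g (Or.inr hm) H hg
      have hr1 : 1 ≤ rows.length - index := by omega
      obtain ⟨g, rfl⟩ : ∃ g', g = g' + 1 :=
        ⟨g - 1, by have := cB2_pos m (rows.length - index) start; omega⟩
      rw [AStep, dif_neg hn, loopA, dif_neg hm] at H
      by_cases hd : PySem.Set.isdisjoint (sets.getD start [])
          (PySem.Set.ofList (rows.getD index [])) = true
      · rw [if_pos hd] at H
        rw [loopB_succ, if_neg hn,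
          findPlaceB_hit _ _ _ _ (by omega) hd]
        obtain ⟨⟨b, p2, s2, r2⟩, hbt⟩ :
            ∃ x, btA rows m (index + 1)
              (parts.set start (parts.getD start [] ++ rows.getD index []))
              (sets.set start (PySem.Set.update (sets.getD start []) (PySem.Set.ofList (rows.getD index []))))
              (rI.set start (rI.getD start [] ++ [(index : Int)])) = x := ⟨_, rfl⟩
        rw [hbt] at H
        cases b with
        | true =>
          refine ihr m (index + 1) 0 _ _ _ (start :: stack) 0 v g (by omega) (by omega) ?_ ?_
          · rw [AStep_zero, hbt]
            exact H
          · have := fuel_push m (rows.length - index) start (by omega) hr1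
            have heq : rows.length - (index + 1) = rows.length - index - 1 := by omega
            rw [heq]
            omega
        | false =>
          have H' : (match AStep rows m index (start + 1)
                (p2.set start (PySem.List.slice (p2.getD start []) none (some (-((rows.getD index []).length : Int)))))
                (s2.set start (PySem.Set.diff (s2.getD start []) (PySem.Set.ofList (rows.getD index []))))
                (r2.set start ((r2.getD start []).dropLast)) with
              | (true, p, _, rr) => some (some p, some rr)
              | (false, p, ss, rr) => popK rows m f p ss rr stack index) = some v := by
            rw [AStep, dif_neg hn]
            exact H
          have hmid := ihs index (start + 1) _ _ _ stack f v
            (cB2 m (rows.length - index) (start + 1) + f) hr (by omega) H' (le_refl _)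
          refine ihr m (index + 1) 0 _ _ _ (start :: stack)
            (cB2 m (rows.length - index) (start + 1) + f) v g (by omega) (by omega) ?_ ?_
          · rw [AStep_zero, hbt]
            show popK rows m _ p2 s2 r2 (start :: stack) (index + 1) = some v
            unfold popK
            simp only [Nat.add_sub_cancel]
            exact hmid
          · have := fuel_split m (rows.length - index) start f (by omega) hr1
            have heq : rows.length - (index + 1) = rows.length - index - 1 := by omega
            rw [heq]
            omega
      · rw [if_neg hd] at H
        rw [loopB_skip rows m _ parts sets rI stack index start hn (by omega)
          (by simp only [Bool.not_eq_true] at hd; exact hd)]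
        refine ihs index (start + 1) parts sets rI stack f v (g + 1) hr (by omega) ?_ ?_
        · rw [AStep, dif_neg hn]
          exact H
        · have := cB2_mono m (rows.length - index) start
          omega

-- ===== VERDICT (by name: the statement is the Claim_ definition above) =====
theorem divide_rows_into_partitions_spec : Claim_equal_divide_rows_into_partitions := by
  unfold Claim_equal_divide_rows_into_partitions Spec_divide_rows_into_partitions
  intro rows max_part _
  simp only [divide_rows_into_partitions, divide_rows_into_partitions_alt]
  obtain ⟨⟨b, p, sst, r⟩, hbt⟩ :
      ∃ x, btA rows max_part.toNat 0 (List.replicate max_part.toNat [])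
        (List.replicate max_part.toNat []) (List.replicate max_part.toNat []) = x := ⟨_, rfl⟩
  have hloop : ∀ v, (match (b, p, sst, r) with
      | (true, p, _, rr) => some ((some p : Option (List (List Int))), (some rr : Option (List (List Int))))
      | (false, _, _, _) => some ((none : Option (List (List Int))), (none : Option (List (List Int))))) = some v →
      loopB rows max_part.toNat (fuelB max_part.toNat rows.length)
        (List.replicate max_part.toNat []) (List.replicate max_part.toNat [])
        (List.replicate max_part.toNat []) [] 0 0 = some v := by
    intro v hv
    refine ML rows max_part.toNat rows.length max_part.toNat 0 0 _ _ _ [] 0 v _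
      (by omega) (by omega) ?_ ?_
    · rw [AStep_zero, hbt]
      cases b with
      | true => exact hv
      | false => exact hv
    · rw [Nat.sub_zero, cB2_zero]
      omega
  cases b with
  | true =>
    rw [hbt, hloop (some p, some r) rfl]
  | false =>
    rw [hbt, hloop (none, none) rfl]
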